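-- pv_equiv track=rewrite | github.com/pairlab/ActAIM | actaim2/utils.py | find_earliest_checkpoint
-- ===== SOURCE A (Python) =====
-- def find_earliest_checkpoint(checkpoint_list, description):
--     # checkpoint_form = "net={},time={},batch_size={},lr={:.0e},train_task={},gpu_num={},slurm_id={}"
--     description_split_list = description.split(",")
--     for f_name in checkpoint_list:
--         f_name_split_list = f_name.split(",")
--         checkpoint_match = True
--         for i in range(len(description_split_list)):
--             if len(f_name_split_list) == len(description_split_list):
--                 item_match = (f_name_split_list[i] == description_split_list[i])
--                 if i == 1:
--                     item_match = not item_match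
--                 checkpoint_match = item_match and checkpoint_match
--             else:
--                 checkpoint_match = False
--         if checkpoint_match:
--             return f_name
--     return None
-- ===== SOURCE B (Python) =====
-- def find_earliest_checkpoint(checkpoint_list, description):
--     # Build a hash index from the timestamp-less field key (plus field count) to
--     # the candidates carrying their timestamp; answer with one bucket lookup.
--     desc = description.split(",")
--     index = {}
--     for f_name in checkpoint_list:
--         parts = f_name.split(",")
--         key = (tuple(parts[:1] + parts[2:]), len(parts))
--         ts = parts[1] if len(parts) > 1 else None
--         index.setdefault(key, []).append((ts, f_name))
--     for ts, f_name in index.get((tuple(desc[:1] + desc[2:]), len(desc)), []):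
--         if ts is None or ts != desc[1]:
--             return f_name
--     return None
-- ===== Notes on version B (the rewrite author's own statement) =====
-- stated objective: alternative
-- what changed: Instead of testing each candidate against the description in a scan, B builds a dict index in one pass mapping (fields-minus-timestamp, field count) to the candidates with their timestamp, then answers with a single bucket lookup followed by a timestamp-inequality scan of that bucket only.
import Mathlib
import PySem

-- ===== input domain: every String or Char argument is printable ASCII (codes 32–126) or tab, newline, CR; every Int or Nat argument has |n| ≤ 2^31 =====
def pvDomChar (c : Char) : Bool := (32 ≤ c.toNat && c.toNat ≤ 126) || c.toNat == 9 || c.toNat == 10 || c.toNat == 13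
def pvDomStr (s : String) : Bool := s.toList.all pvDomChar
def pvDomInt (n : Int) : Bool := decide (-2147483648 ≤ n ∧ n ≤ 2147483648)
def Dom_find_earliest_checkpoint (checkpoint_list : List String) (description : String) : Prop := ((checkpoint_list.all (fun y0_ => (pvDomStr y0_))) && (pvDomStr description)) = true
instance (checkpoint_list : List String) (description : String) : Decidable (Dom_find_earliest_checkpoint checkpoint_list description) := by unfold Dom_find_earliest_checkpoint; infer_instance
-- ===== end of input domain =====

-- B replaces A's match-testing scan by a staged dict index: one pass groups the candidates
-- under the key (fields minus the timestamp slot, field count), then a single bucket lookup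
-- plus a timestamp-inequality scan of that bucket answers; objective: alternative.

-- ===== PORT A =====
-- inner for-loop over range(len(description_split_list)) with accumulator checkpoint_match.
-- List indexing f_name_split_list[i] / description_split_list[i] is ported as getD: inside the
-- true branch the lengths are equal and i < len, so the index is always in range (no IndexError).
def pvAinner (dsl fsl : List String) : Bool :=
  (List.range dsl.length).foldl
    (fun checkpoint_match i =>
      if fsl.length == dsl.length then
        (if i == 1 then !(fsl.getD i "" == dsl.getD i "")
         else (fsl.getD i "" == dsl.getD i "")) && checkpoint_match
      else false)
    true

-- outer for-loop with early return; split(",") has a nonempty separator so split? is some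
def pvAgo (dsl : List String) : List String → Option String
  | [] => none
  | f :: rest =>
    let fsl := (PySem.Str.split? f ",").getD []
    if pvAinner dsl fsl then some f else pvAgo dsl rest

def find_earliest_checkpoint (checkpoint_list : List String) (description : String) : Option String :=
  pvAgo ((PySem.Str.split? description ",").getD []) checkpoint_list

-- ===== PORT B =====
-- slices parts[:1] and parts[2:] ported as take 1 / drop 2 (exact for these nonnegative bounds)
def pvKey (parts : List String) : List String × Int :=
  (parts.take 1 ++ parts.drop 2, (parts.length : Int))

-- parts[1] if len(parts) > 1 else None; the index is in range, ported as getD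
def pvTs (parts : List String) : Option String :=
  if 1 < parts.length then some (parts.getD 1 "") else none

-- the index-building loop: index.setdefault(key, []).append((ts, f_name))
def pvBuild (cl : List String) : PySem.Dict (List String × Int) (List (Option String × String)) :=
  cl.foldl
    (fun d f =>
      let parts := (PySem.Str.split? f ",").getD []
      d.modify (pvKey parts) [] (· ++ [(pvTs parts, f)]))
    PySem.Dict.empty

-- the bucket scan: 'ts is None or ts != desc[1]'. Python evaluates desc[1] only when ts is
-- not None, and every such bucket entry shares the description's field count ≥ 2, so the
-- getD-1 default is never the deciding value; exact on all reachable inputs.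
def pvScan (d1 : String) : List (Option String × String) → Option String
  | [] => none
  | (ts, f) :: rest =>
    match ts with
    | none => some f
    | some t => if t != d1 then some f else pvScan d1 rest

def find_earliest_checkpoint_alt (checkpoint_list : List String) (description : String) : Option String :=
  let desc := (PySem.Str.split? description ",").getD []
  pvScan (desc.getD 1 "") ((pvBuild checkpoint_list).getD (pvKey desc) [])

-- ===== PRECONDITION & SPEC =====
def Spec_find_earliest_checkpoint (checkpoint_list : List String) (description : String) (out : Option String) : Prop := out = find_earliest_checkpoint_alt checkpoint_list description
instance (checkpoint_list : List String) (description : String) (out : Option String) : Decidable (Spec_find_earliest_checkpoint checkpoint_list description out) := by unfold Spec_find_earliest_checkpoint; infer_instance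

-- ===== CLAIM (what is proved, stated in full; the proofs are below) =====
def Claim_equal_find_earliest_checkpoint : Prop := ∀ (checkpoint_list : List String) (description : String), Dom_find_earliest_checkpoint checkpoint_list description → Spec_find_earliest_checkpoint checkpoint_list description (find_earliest_checkpoint checkpoint_list description)

-- ===== LEMMAS AND PROOFS =====

theorem pv_foldl_and (f : Nat → Bool) (l : List Nat) (b : Bool) :
    l.foldl (fun m i => f i && m) b = (b && l.all f) := by
  induction l generalizing b with
  | nil => simp
  | cons x xs ih =>
    simp only [List.foldl_cons, List.all_cons, ih]
    cases b <;> cases f x <;> simp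

theorem pv_foldl_false (l : List Nat) (b : Bool) (hl : l ≠ []) :
    l.foldl (fun (_ : Bool) (_ : Nat) => false) b = false := by
  induction l generalizing b with
  | nil => exact absurd rfl hl
  | cons x xs ih =>
    cases xs with
    | nil => simp
    | cons y ys => simpa using ih false (by simp)

theorem pv_splitgo_ne_nil (sep : List Char) (fuel : Nat) :
    ∀ (l cur : List Char) (acc : List (List Char)),
      PySem.Chars.splitOn.go sep fuel l cur acc ≠ [] := by
  induction fuel with
  | zero => intro l cur acc; simp [PySem.Chars.splitOn.go]
  | succ n ih =>
    intro l cur acc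
    cases l with
    | nil => simp [PySem.Chars.splitOn.go]
    | cons c rest =>
      rw [PySem.Chars.splitOn.go]
      split
      · exact ih _ _ _
      · exact ih _ _ _

theorem pv_split_ne_nil (s : String) : (PySem.Str.split? s ",").getD [] ≠ [] := by
  simp only [PySem.Str.split?, PySem.Chars.split?, PySem.Chars.splitOn]
  intro h
  simp only [String.toList] at h
  revert h
  split
  · next hh => exact absurd hh (by decide)
  · simp only [Option.map_some, Option.getD_some, List.map_eq_nil_iff]
    exact pv_splitgo_ne_nil _ _ _ _ _

theorem pv_all_range_beq (fr dr : List String) (h : fr.length = dr.length) :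
    ((List.range dr.length).all fun i => fr.getD i "" == dr.getD i "") = (fr == dr) := by
  induction fr generalizing dr with
  | nil =>
    cases dr with
    | nil => simp
    | cons _ _ => simp at h
  | cons x xs ih =>
    cases dr with
    | nil => simp at h
    | cons y ys =>
      have h' : xs.length = ys.length := by simpa using h
      simp only [List.length_cons, List.range_succ_eq_map, List.all_cons, List.all_map,
        Function.comp_def, List.getD_cons_succ, List.getD_cons_zero, List.cons_beq_cons]
      rw [ih ys h']

-- A's inner loop as a whole-list test
theorem pv_inner_eq (dsl fsl : List String) (hd : dsl ≠ []) :
    pvAinner dsl fsl =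
      ((fsl.length == dsl.length)
        && ((fsl.take 1 ++ fsl.drop 2 == dsl.take 1 ++ dsl.drop 2)
            && (decide (fsl.length < 2) || !(fsl.getD 1 "" == dsl.getD 1 "")))) := by
  by_cases h : fsl.length = dsl.length
  · have hb : (fsl.length == dsl.length) = true := by simpa using h
    simp only [pvAinner, hb, if_true, Bool.true_and, pv_foldl_and]
    cases dsl with
    | nil => exact absurd rfl hd
    | cons d0 ds =>
      cases fsl with
      | nil => simp at h
      | cons f0 fs =>
        cases ds with
        | nil =>
          cases fs with
          | nil => simp [List.range_succ]
          | cons _ _ => simp at h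
        | cons d1 dr =>
          cases fs with
          | nil => simp at h
          | cons f1 fr =>
            have hlen : fr.length = dr.length := by simpa using h
            simp only [List.range_succ_eq_map, List.all_cons, List.all_map,
              Function.comp_def, List.getD_cons_succ, List.getD_cons_zero, List.length_cons]
            have e1 : ∀ x : ℕ, (x.succ.succ == 1) = false := fun x => by simp
            simp only [e1, Bool.false_eq_true, if_false, show ((0 : ℕ) == 1) = false from by decide,
              show ((Nat.succ 0 : ℕ) == 1) = true from by decide, if_true,
              pv_all_range_beq fr dr hlen]
            simp only [List.take_succ_cons, List.take_zero, List.drop_succ_cons, List.drop_zero,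
              List.cons_append, List.nil_append, List.cons_beq_cons]
            cases f0 == d0 <;> cases f1 == d1 <;> cases fr == dr <;> simp
  · have hb : (fsl.length == dsl.length) = false := by simpa using h
    simp only [pvAinner, hb, Bool.false_and, Bool.false_eq_true, if_false]
    rw [pv_foldl_false]
    have : dsl.length ≠ 0 := by simpa using hd
    simp [List.range_eq_nil, this]

-- the bucket of K in the built index is the in-order list of (ts, f) whose key equals K
theorem pv_bucket (cl : List String) (K : List String × Int) :
    (pvBuild cl).getD K [] =
      ((cl.map (fun f =>
          let parts := (PySem.Str.split? f ",").getD []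
          (pvKey parts, (pvTs parts, f)))).filter (fun p => p.1 == K)).map (·.2) := by
  have hmap : pvBuild cl =
      (cl.map (fun f =>
          let parts := (PySem.Str.split? f ",").getD []
          (pvKey parts, (pvTs parts, f)))).foldl
        (fun d p => d.modify p.1 [] (· ++ [p.2])) PySem.Dict.empty := by
    rw [List.foldl_map]; rfl
  rw [hmap, PySem.Dict.getD_foldl_modify_append]
  simp [PySem.Dict.getD_empty]

-- A's scan over the candidates equals B's scan over the description's bucket
theorem pv_go_eq_scan (dsl : List String) (hd : dsl ≠ []) (cl : List String) :
    pvAgo dsl cl =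
      pvScan (dsl.getD 1 "")
        (((cl.map (fun f =>
            let parts := (PySem.Str.split? f ",").getD []
            (pvKey parts, (pvTs parts, f)))).filter (fun p => p.1 == pvKey dsl)).map (·.2)) := by
  induction cl with
  | nil => rfl
  | cons f rest ih =>
    rw [pvAgo]
    simp only [List.map_cons, List.filter_cons]
    rw [pv_inner_eq _ _ hd]
    set fsl := (PySem.Str.split? f ",").getD [] with hfsl
    by_cases hk : pvKey fsl = pvKey dsl
    · have hkb : (pvKey fsl == pvKey dsl) = true := by simpa using hk
      have hlen : fsl.length = dsl.length := by
        have := congrArg Prod.snd hk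
        simpa [pvKey] using this
      have hlist : (fsl.take 1 ++ fsl.drop 2 == dsl.take 1 ++ dsl.drop 2) = true := by
        have := congrArg Prod.fst hk
        simpa [pvKey] using this
      simp only [hkb, if_true, List.map_cons, pvScan, hlist, Bool.true_and,
        show (fsl.length == dsl.length) = true from by simpa using hlen]
      by_cases hsmall : fsl.length < 2
      · have hts : pvTs fsl = none := by simp [pvTs]; omega
        simp [hts, hsmall]
      · have hts : pvTs fsl = some (fsl.getD 1 "") := by
          simp only [pvTs, if_pos (by omega : 1 < fsl.length)]
        simp only [hts,
          show decide (fsl.length < 2) = false from by simpa using hsmall,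
          Bool.false_or]
        by_cases heq : fsl[1]?.getD "" = dsl[1]?.getD ""
        · simp [List.getD, bne, heq, ih]
        · simp [List.getD, bne, heq]
    · have hkb : (pvKey fsl == pvKey dsl) = false := by simpa using hk
      have hfail : ((fsl.length == dsl.length)
          && ((fsl.take 1 ++ fsl.drop 2 == dsl.take 1 ++ dsl.drop 2)
              && (decide (fsl.length < 2) || !(fsl.getD 1 "" == dsl.getD 1 "")))) = false := by
        by_cases hlen : fsl.length = dsl.length
        · have hlist : (fsl.take 1 ++ fsl.drop 2 == dsl.take 1 ++ dsl.drop 2) = false := by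
            by_contra hc
            have hlist' : fsl.take 1 ++ fsl.drop 2 = dsl.take 1 ++ dsl.drop 2 := by
              cases hcc : (fsl.take 1 ++ fsl.drop 2 == dsl.take 1 ++ dsl.drop 2) with
              | false => exact absurd hcc hc
              | true => exact eq_of_beq hcc
            exact hk (by simp [pvKey, hlist', hlen])
          simp [hlist]
        · simp [show (fsl.length == dsl.length) = false from by simpa using hlen]
      simp only [hfail, Bool.false_eq_true, if_false, hkb]
      exact ih

-- ===== VERDICT (by name: the statement is the Claim_ definition above) =====
theorem find_earliest_checkpoint_spec : Claim_equal_find_earliest_checkpoint := by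
  intro cl d _
  unfold Spec_find_earliest_checkpoint find_earliest_checkpoint find_earliest_checkpoint_alt
  show pvAgo ((PySem.Str.split? d ",").getD []) cl =
    pvScan (((PySem.Str.split? d ",").getD []).getD 1 "")
      ((pvBuild cl).getD (pvKey ((PySem.Str.split? d ",").getD [])) [])
  rw [pv_bucket]
  exact pv_go_eq_scan _ (pv_split_ne_nil d) cl
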